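-- pv_equiv track=rewrite | github.com/LorenzHW/Coding-Competitions | kickstart/2019/RoundB/1_problem/palindromes.py | create_prefix_sum_array_for_every_letter
-- ===== SOURCE A (Python) =====
-- import string
--
-- def create_prefix_sum_array_for_every_letter(input_string):
--     prefix_sum_arrays = {}
--     for letter in string.ascii_uppercase:
--         arr = []
--         counter = 0
--         for c in input_string:
--             if c == letter:
--                 counter += 1
--             arr.append(counter)
--         prefix_sum_arrays[letter] = arr
--     return prefix_sum_arrays
-- ===== SOURCE B (Python) =====
-- import string
--
-- def create_prefix_sum_array_for_every_letter(input_string):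
--     # single pass: 26 running counters updated together, one traversal of the string
--     state = [(letter, 0, []) for letter in string.ascii_uppercase]
--     for c in input_string:
--         new_state = []
--         for letter, cnt, arr in state:
--             if c == letter:
--                 cnt += 1
--             arr.append(cnt)
--             new_state.append((letter, cnt, arr))
--         state = new_state
--     return {letter: arr for letter, _, arr in state}
-- ===== Notes on version B (the rewrite author's own statement) =====
-- stated objective: alternative
-- what changed: A rescans the whole string once per letter (26 independent passes, each with its own counter); B makes a single pass over the string maintaining all 26 running counters and lists simultaneously, then assembles the dict at the end.
import Mathlib
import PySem

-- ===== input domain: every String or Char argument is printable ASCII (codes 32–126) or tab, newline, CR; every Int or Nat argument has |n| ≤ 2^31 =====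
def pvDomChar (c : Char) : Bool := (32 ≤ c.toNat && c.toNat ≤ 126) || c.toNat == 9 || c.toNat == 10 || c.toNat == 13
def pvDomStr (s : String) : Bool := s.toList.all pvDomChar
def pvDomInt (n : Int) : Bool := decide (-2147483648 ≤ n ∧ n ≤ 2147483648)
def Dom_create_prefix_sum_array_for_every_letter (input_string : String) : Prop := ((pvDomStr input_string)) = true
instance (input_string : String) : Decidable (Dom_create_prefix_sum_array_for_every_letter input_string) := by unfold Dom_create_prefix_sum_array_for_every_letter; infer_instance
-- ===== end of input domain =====

-- B builds all 26 prefix-count lists in ONE pass over the string with 26 running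
-- counters, instead of A's 26 independent rescans; objective: alternative (same cost).

-- ===== PORT A =====
-- string.ascii_uppercase, iterated character by character
def pvUppercase : List Char := "ABCDEFGHIJKLMNOPQRSTUVWXYZ".toList

-- A's inner loop: state (arr, counter); append counter after the conditional bump
def pvInnerA (letter : Char) (cs : List Char) : List Int × Int :=
  cs.foldl (fun p c =>
    let counter := if c = letter then p.2 + 1 else p.2
    (p.1 ++ [counter], counter)) ([], 0)

def create_prefix_sum_array_for_every_letter (input_string : String) : List (String × List Int) :=
  (pvUppercase.foldl (fun d letter =>
      d.insert (String.singleton letter) (pvInnerA letter input_string.toList))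
    (PySem.Dict.empty : PySem.Dict String (List Int × Int))).items
    |>.map (fun p => (p.1, p.2.1))

-- ===== PORT B =====
-- one step of B's single pass: bump the matching counter, append every counter
def pvStepB (c : Char) (e : Char × Int × List Int) : Char × Int × List Int :=
  let cnt := if c = e.1 then e.2.1 + 1 else e.2.1
  (e.1, cnt, e.2.2 ++ [cnt])

def create_prefix_sum_array_for_every_letter_alt (input_string : String) : List (String × List Int) :=
  let init : List (Char × Int × List Int) := pvUppercase.map (fun l => (l, 0, []))
  let final := input_string.toList.foldl (fun st c => st.map (pvStepB c)) init
  final.map (fun e => (String.singleton e.1, e.2.2))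

-- ===== PRECONDITION & SPEC =====
def Spec_create_prefix_sum_array_for_every_letter (input_string : String) (out : List (String × List Int)) : Prop := out = create_prefix_sum_array_for_every_letter_alt input_string
instance (input_string : String) (out : List (String × List Int)) : Decidable (Spec_create_prefix_sum_array_for_every_letter input_string out) := by unfold Spec_create_prefix_sum_array_for_every_letter; infer_instance

-- ===== CLAIM (what is proved, stated in full; the proofs are below) =====
def Claim_equal_create_prefix_sum_array_for_every_letter : Prop := ∀ (input_string : String), Dom_create_prefix_sum_array_for_every_letter input_string → Spec_create_prefix_sum_array_for_every_letter input_string (create_prefix_sum_array_for_every_letter input_string)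

-- ===== LEMMAS AND PROOFS =====

theorem pvSingleton_inj {a b : Char} (h : String.singleton a = String.singleton b) : a = b := by
  have := congrArg String.toList h
  simpa [String.singleton] using this

-- a fold that maps each state entry independently commutes with the map
theorem pvFoldMap {α σ : Type} (g : α → σ → σ) :
    ∀ (cs : List α) (st : List σ),
      cs.foldl (fun st c => st.map (g c)) st
        = st.map (fun x => cs.foldl (fun x c => g c x) x) := by
  intro cs
  induction cs with
  | nil => intro st; simp
  | cons c cs ih =>
    intro st
    simp [List.foldl_cons, ih (st.map (g c)), List.map_map, Function.comp]

-- B's per-letter fold carries the letter and computes exactly A's inner-loop state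
theorem pvFoldLetter (l : Char) :
    ∀ (cs : List Char) (cnt : Int) (arr : List Int),
      cs.foldl (fun x c => pvStepB c x) (l, cnt, arr)
        = (l, (cs.foldl (fun p c =>
            let counter := if c = l then p.2 + 1 else p.2
            (p.1 ++ [counter], counter)) (arr, cnt)).2,
              (cs.foldl (fun p c =>
            let counter := if c = l then p.2 + 1 else p.2
            (p.1 ++ [counter], counter)) (arr, cnt)).1) := by
  intro cs
  induction cs with
  | nil => intro cnt arr; rfl
  | cons c cs ih =>
    intro cnt arr
    simp only [List.foldl_cons, pvStepB]
    exact ih _ _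

-- A's dict fold over distinct fresh letters: items is just the appended list
theorem pvItemsFold (f : Char → List Int × Int) :
    ∀ (ls : List Char) (d : PySem.Dict String (List Int × Int)),
      ls.Nodup → (∀ l ∈ ls, d.contains (String.singleton l) = false) →
      (ls.foldl (fun d letter => d.insert (String.singleton letter) (f letter)) d).items
        = d.items ++ ls.map (fun l => (String.singleton l, f l)) := by
  intro ls
  induction ls with
  | nil => intro d _ _; simp
  | cons l ls ih =>
    intro d hnd hfresh
    have hfresh' : ∀ l' ∈ ls,
        (d.insert (String.singleton l) (f l)).contains (String.singleton l') = false := by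
      intro l' hl'
      rw [PySem.Dict.contains_insert]
      have hne : String.singleton l' ≠ String.singleton l := by
        intro h
        exact (List.nodup_cons.mp hnd).1 (pvSingleton_inj h ▸ hl')
      simp [hne, hfresh l' (List.mem_cons_of_mem _ hl')]
    simp only [List.foldl_cons, List.map_cons]
    rw [ih _ (List.Nodup.of_cons hnd) hfresh',
        PySem.Dict.items_insert_of_not_contains d _ (hfresh l (List.mem_cons_self ..))]
    simp

-- ===== VERDICT (by name: the statement is the Claim_ definition above) =====
theorem create_prefix_sum_array_for_every_letter_spec : Claim_equal_create_prefix_sum_array_for_every_letter := by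
  intro s _
  show _ = _
  simp only [create_prefix_sum_array_for_every_letter, create_prefix_sum_array_for_every_letter_alt]
  rw [pvItemsFold _ pvUppercase PySem.Dict.empty (by decide) (by intro l _; rfl),
      pvFoldMap pvStepB s.toList]
  simp only [show (PySem.Dict.empty : PySem.Dict String (List Int × Int)).items = [] from rfl,
    List.nil_append, List.map_map]
  apply List.map_congr_left
  intro l _
  simp [Function.comp, pvFoldLetter l s.toList 0 [], pvInnerA]
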